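-- pv_equiv track=rewrite | github.com/clarahelena/flyfood-project | projeto2.py | criador_matriz
-- ===== SOURCE A (Python) =====
-- def calc_distancia_manhatan(coordenada1, coordenada2):
--     return abs(coordenada1[0] - coordenada2[0]) + abs(coordenada1[1] - coordenada2[1])
--
-- def criador_matriz(coordenadas):
--     pontos = ['R'] + sorted([k for k in coordenadas.keys() if k != 'R'])
--     total_pontos = len(pontos)
--     matriz = [[0] * total_pontos for _ in range(total_pontos)]
--
--     for i in range(total_pontos):
--         for j in range(total_pontos):
--             if i != j:
--                 cidade_I = pontos[i]
--                 cidade_J = pontos[j]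
--                 coord_i = coordenadas[cidade_I]
--                 coord_j = coordenadas[cidade_J]
--                 distancia = calc_distancia_manhatan(coord_i, coord_j)
--                 matriz[i][j] = distancia
--
--     return pontos, matriz
-- ===== SOURCE B (Python) =====
-- def criador_matriz(coordenadas):
--     pontos = ['R'] + sorted(k for k in coordenadas if k != 'R')
--     cs = [coordenadas[p] for p in pontos]
--     n = len(pontos)
--     matriz = []
--     for i in range(n):
--         xi, yi = cs[i]
--         row = [matriz[j][i] for j in range(i)]
--         row.append(0)
--         for j in range(i + 1, n):
--             xj, yj = cs[j]
--             row.append(abs(xi - xj) + abs(yi - yj))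
--         matriz.append(row)
--     return pontos, matriz
-- ===== Notes on version B (the rewrite author's own statement) =====
-- stated objective: faster
-- what changed: B hoists all dict lookups into one coordinate list built once, then builds each row by mirroring the already-computed column of earlier rows (Manhattan distance is symmetric), so only the upper triangle of distances is computed and the matrix is built row-by-row without preallocating and mutating a zero matrix.
-- outside the precondition, e.g. on criador_matriz({}): A returns (['R'], [[0]]), B raises KeyError
import Mathlib
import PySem

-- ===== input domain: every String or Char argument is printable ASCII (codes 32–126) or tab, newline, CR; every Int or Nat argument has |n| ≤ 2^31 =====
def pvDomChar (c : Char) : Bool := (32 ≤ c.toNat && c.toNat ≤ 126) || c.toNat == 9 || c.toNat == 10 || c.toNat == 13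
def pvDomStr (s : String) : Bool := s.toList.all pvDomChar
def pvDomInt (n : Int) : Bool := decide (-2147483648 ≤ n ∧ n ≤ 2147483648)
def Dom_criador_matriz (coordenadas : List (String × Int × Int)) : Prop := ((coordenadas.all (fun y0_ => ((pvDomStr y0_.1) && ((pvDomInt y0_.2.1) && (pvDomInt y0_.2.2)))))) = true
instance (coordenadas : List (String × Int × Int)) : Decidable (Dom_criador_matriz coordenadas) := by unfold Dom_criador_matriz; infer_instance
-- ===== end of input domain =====

-- B computes each Manhattan distance once (mirroring the earlier rows' column, by symmetry) from a
-- coordinate list fetched once, instead of A's full double loop with two dict lookups per cell.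

-- ===== PORT A =====
-- helper calc_distancia_manhatan
def pvMan (c1 c2 : Int × Int) : Int := |c1.1 - c2.1| + |c1.2 - c2.2|

def criador_matriz (coordenadas : List (String × Int × Int)) : List String × List (List Int) :=
  let d := PySem.Dict.ofList coordenadas
  let pontos := "R" :: PySem.List.sorted ((PySem.Dict.keys d).filter (fun k => k ≠ "R")) (fun k => k) false
  let total := pontos.length
  let matriz0 := (List.range total).map (fun _ => List.replicate total (0:Int))
  let matriz := (List.range total).foldl (fun m i =>
    (List.range total).foldl (fun m j =>
      if i ≠ j then
        let cidadeI := pontos.getD i ""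
        let cidadeJ := pontos.getD j ""
        let coordI := (PySem.Dict.get? d cidadeI).getD (0, 0)   -- in-range on Pre_: lookup always hits
        let coordJ := (PySem.Dict.get? d cidadeJ).getD (0, 0)
        let distancia := pvMan coordI coordJ
        m.set i ((m.getD i []).set j distancia)
      else m) m) matriz0
  (pontos, matriz)

-- ===== PORT B =====
def criador_matriz_alt (coordenadas : List (String × Int × Int)) : List String × List (List Int) :=
  let d := PySem.Dict.ofList coordenadas
  let pontos := "R" :: PySem.List.sorted ((PySem.Dict.keys d).filter (fun k => k ≠ "R")) (fun k => k) false
  let cs := pontos.map (fun p => (PySem.Dict.get? d p).getD ((0:Int), (0:Int)))   -- on Pre_ every lookup hits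
  let n := pontos.length
  let matriz := (List.range n).foldl (fun mz i =>
    let ci := cs.getD i (0, 0)
    let row := (List.range i).map (fun j => (mz.getD j []).getD i 0)   -- mirror of earlier rows' column i
    let row := row ++ [(0:Int)]
    let row := row ++ (List.range' (i+1) (n - (i+1))).map (fun j =>
      let cj := cs.getD j (0, 0)
      |ci.1 - cj.1| + |ci.2 - cj.2|)
    mz ++ [row]) []
  (pontos, matriz)

-- ===== PRECONDITION & SPEC =====
-- Pre_ excludes exactly the inputs where the key 'R' is absent: on those the Python A raises KeyError
-- whenever some other key exists, and on the single remaining input (the empty dict, where A happens to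
-- return (['R'], [[0]]) without ever looking 'R' up) B's eager coordinate fetch itself raises KeyError.
def Pre_criador_matriz (coordenadas : List (String × Int × Int)) : Prop :=
  "R" ∈ coordenadas.map Prod.fst
instance (coordenadas : List (String × Int × Int)) : Decidable (Pre_criador_matriz coordenadas) := by
  unfold Pre_criador_matriz; infer_instance

def pvWitness_criador_matriz : (List (String × Int × Int)) := [("R", 0, 0), ("A", 1, 2)]

def Spec_criador_matriz (coordenadas : List (String × Int × Int)) (out : List String × List (List Int)) : Prop := out = criador_matriz_alt coordenadas
instance (coordenadas : List (String × Int × Int)) (out : List String × List (List Int)) : Decidable (Spec_criador_matriz coordenadas out) := by unfold Spec_criador_matriz; infer_instance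

-- ===== CLAIM (what is proved, stated in full; the proofs are below) =====
def Claim_equal_criador_matriz : Prop := ∀ (coordenadas : List (String × Int × Int)), Dom_criador_matriz coordenadas → Pre_criador_matriz coordenadas → Spec_criador_matriz coordenadas (criador_matriz coordenadas)

-- ===== LEMMAS AND PROOFS =====

-- getD through map, in range
lemma pv_getD_map {α β : Type} (xs : List α) (f : α → β) (i : Nat) (d : β) (d' : α)
    (h : i < xs.length) : (xs.map f).getD i d = f (xs.getD i d') := by
  simp [List.getD_eq_getElem?_getD, h]

-- setting one cell of a range-indexed table
lemma pv_set_map_range {α : Type} (g : Nat → α) (N k : Nat) (v : α) (_hk : k < N) :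
    ((List.range N).map g).set k v = (List.range N).map (fun i => if i = k then v else g i) := by
  apply List.ext_getElem
  · simp
  · intro t h1 h2
    have ht : t < N := by simpa using h1
    simp only [List.getElem_set, List.getElem_map, List.getElem_range]
    by_cases h : k = t
    · simp [h]
    · simp only [if_neg h, if_neg (fun hh : t = k => h hh.symm)]

-- A's inner loop over row i rewritten as a single row update
lemma pv_inner (dist : Nat → Nat → Int) (i : Nat) :
    ∀ (js : List Nat) (m : List (List Int)), i < m.length →
      js.foldl (fun m j => if i ≠ j then m.set i ((m.getD i []).set j (dist i j)) else m) m
        = m.set i (js.foldl (fun r j => if i ≠ j then r.set j (dist i j) else r) (m.getD i [])) := by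
  intro js
  induction js with
  | nil =>
      intro m hm
      simp [List.getD_eq_getElem?_getD, hm, List.set_getElem_self]
  | cons j js ih =>
      intro m hm
      by_cases hij : i = j
      · subst hij
        rw [List.foldl_cons, List.foldl_cons, if_neg (by simp), if_neg (by simp)]
        exact ih m hm
      · rw [List.foldl_cons, List.foldl_cons, if_pos hij, if_pos hij]
        have h1 : i < (m.set i ((m.getD i []).set j (dist i j))).length := by simpa using hm
        rw [ih _ h1, List.set_set]
        have hget : ((m.set i ((m.getD i []).set j (dist i j))).getD i [])
            = (m.getD i []).set j (dist i j) := by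
          simp [List.getD_eq_getElem?_getD, hm]
        rw [hget]

-- A's row loop from a zero row builds the full row
lemma pv_rowfold (dist : Nat → Nat → Int) (i N : Nat) :
    ∀ k, k ≤ N →
      (List.range k).foldl (fun r j => if i ≠ j then r.set j (dist i j) else r) (List.replicate N 0)
        = (List.range N).map (fun j => if j < k ∧ i ≠ j then dist i j else 0) := by
  intro k
  induction k with
  | zero => intro _; simp
  | succ k ih =>
      intro hk
      have hkN : k < N := hk
      rw [List.range_succ, List.foldl_append, ih (Nat.le_of_lt hkN)]
      by_cases hik : i = k
      · rw [List.foldl_cons, List.foldl_nil, if_neg (by simp [hik])]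
        apply List.map_congr_left
        intro j hj
        simp only [List.mem_range] at hj
        by_cases hjk : j = k
        · simp [hjk, hik]
        · have h3 : j < k ↔ j < k + 1 := by omega
          simp [h3]
      · rw [List.foldl_cons, List.foldl_nil, if_pos hik, pv_set_map_range _ N k _ hkN]
        apply List.map_congr_left
        intro j hj
        simp only [List.mem_range] at hj
        by_cases hjk : j = k
        · have hij : i ≠ j := by omega
          simp [hjk, hij, hik]
        · have h3 : j < k ↔ j < k + 1 := by omega
          simp [hjk, h3]

-- A's double loop builds the full table
lemma pv_A_table (dist : Nat → Nat → Int) (N : Nat) :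
    ∀ k, k ≤ N →
      (List.range k).foldl (fun m i =>
          (List.range N).foldl (fun m j => if i ≠ j then m.set i ((m.getD i []).set j (dist i j)) else m) m)
        ((List.range N).map (fun _ => List.replicate N (0:Int)))
        = (List.range N).map (fun i =>
            if i < k then (List.range N).map (fun j => if i = j then 0 else dist i j)
            else List.replicate N 0) := by
  intro k
  induction k with
  | zero => intro _; simp
  | succ k ih =>
      intro hk
      have hkN : k < N := hk
      rw [List.range_succ, List.foldl_append, ih (Nat.le_of_lt hkN)]
      simp only [List.foldl_cons, List.foldl_nil]
      rw [pv_inner dist k _ _ (by simp [hkN])]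
      have hget : (((List.range N).map (fun i =>
          if i < k then (List.range N).map (fun j => if i = j then 0 else dist i j)
          else List.replicate N 0)).getD k []) = List.replicate N 0 := by
        rw [PySem.List.getD_map_range _ N k _ hkN]; simp
      rw [hget, pv_rowfold dist k N N (le_refl N), pv_set_map_range _ N k _ hkN]
      apply List.map_congr_left
      intro i hi
      simp only [List.mem_range] at hi
      by_cases hik : i = k
      · subst hik
        simp only [if_pos (Nat.lt_succ_self i)]
        apply List.map_congr_left
        intro j hj
        simp only [List.mem_range] at hj
        by_cases hij : i = j <;> simp [hij, hj]
      · have h3 : i < k ↔ i < k + 1 := by omega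
        simp [hik, h3]

-- B's loop builds the same table (using symmetry for the mirrored prefix)
lemma pv_B_table (dist : Nat → Nat → Int) (hsym : ∀ i j, dist i j = dist j i) (N : Nat) :
    ∀ k, k ≤ N →
      (List.range k).foldl (fun mz i =>
          mz ++ [(List.range i).map (fun j => (mz.getD j []).getD i 0) ++ [(0:Int)] ++
                 (List.range' (i+1) (N - (i+1))).map (fun j => dist i j)]) []
        = (List.range k).map (fun i => (List.range N).map (fun j => if i = j then 0 else dist i j)) := by
  intro k
  induction k with
  | zero => intro _; simp
  | succ k ih =>
      intro hk
      have hkN : k < N := hk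
      rw [List.range_succ, List.foldl_append, ih (Nat.le_of_lt hkN), List.map_append]
      simp only [List.foldl_cons, List.foldl_nil, List.map_cons, List.map_nil]
      congr 2
      -- the mirrored prefix equals the first k entries of row k
      have hmirror : (List.range k).map (fun j =>
            ((((List.range k).map (fun i => (List.range N).map (fun j => if i = j then 0 else dist i j)))).getD j []).getD k 0)
          = (List.range k).map (fun j => if k = j then 0 else dist k j) := by
        apply List.map_congr_left
        intro j hj
        simp only [List.mem_range] at hj
        rw [PySem.List.getD_map_range _ k j _ hj,
            PySem.List.getD_map_range _ N k _ hkN]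
        have hjk : j ≠ k := Nat.ne_of_lt hj
        have hkj : k ≠ j := fun h => hjk h.symm
        simp [hjk, hkj, hsym j k]
      -- row k of the table splits into prefix ++ [0] ++ strict upper part
      have hsplit : (List.range N).map (fun j => if k = j then (0:Int) else dist k j)
          = ((List.range k).map (fun j => if k = j then (0:Int) else dist k j) ++ [(0:Int)])
            ++ (List.range' (k+1) (N - (k+1))).map (fun j => dist k j) := by
        conv_lhs => rw [show N = (k + 1) + (N - (k + 1)) by omega, List.range_add,
          List.range_succ, List.map_append, List.map_append]
        congr 1
        · congr 1
          simp
        · simp only [List.range'_eq_map_range, List.map_map]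
          apply List.map_congr_left
          intro j _
          have h5 : ¬ (k = k + 1 + j) := by omega
          simp [h5]
      rw [hmirror, hsplit]

-- the two per-cell value functions agree inside the table
lemma pv_dist_eq (d : PySem.Dict String (Int × Int)) (pontos : List String) (i : Nat)
    (hi : i < pontos.length) :
    (PySem.Dict.get? d (pontos.getD i "")).getD ((0:Int),(0:Int))
      = (pontos.map (fun p => (PySem.Dict.get? d p).getD ((0:Int),(0:Int)))).getD i (0, 0) := by
  rw [pv_getD_map pontos _ i _ "" hi]

-- ===== VERDICT (by name: the statement is the Claim_ definition above) =====
theorem criador_matriz_spec : Claim_equal_criador_matriz := by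
  intro coordenadas _ _
  unfold Spec_criador_matriz criador_matriz criador_matriz_alt
  simp only []
  set d := PySem.Dict.ofList coordenadas with hd
  set pontos := "R" :: PySem.List.sorted ((PySem.Dict.keys d).filter (fun k => k ≠ "R")) (fun k => k) false with hp
  set N := pontos.length with hN
  set cs := pontos.map (fun p => (PySem.Dict.get? d p).getD ((0:Int), (0:Int))) with hcs
  refine Prod.ext rfl ?_
  show (List.range N).foldl _ ((List.range N).map (fun _ => List.replicate N (0:Int)))
      = (List.range N).foldl _ []
  have hsym : ∀ i j : Nat,
      |(cs.getD i (0,0)).1 - (cs.getD j (0,0)).1| + |(cs.getD i (0,0)).2 - (cs.getD j (0,0)).2|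
        = |(cs.getD j (0,0)).1 - (cs.getD i (0,0)).1| + |(cs.getD j (0,0)).2 - (cs.getD i (0,0)).2| := by
    intro i j
    rw [abs_sub_comm ((cs.getD i (0,0)).1), abs_sub_comm ((cs.getD i (0,0)).2)]
  rw [pv_A_table (fun i j => pvMan ((PySem.Dict.get? d (pontos.getD i "")).getD (0, 0))
        ((PySem.Dict.get? d (pontos.getD j "")).getD (0, 0))) N N (le_refl N),
      pv_B_table (fun i j => |(cs.getD i (0,0)).1 - (cs.getD j (0,0)).1| + |(cs.getD i (0,0)).2 - (cs.getD j (0,0)).2|)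
        hsym N N (le_refl N)]
  apply List.map_congr_left
  intro i hi
  simp only [List.mem_range] at hi
  simp only [if_pos hi]
  apply List.map_congr_left
  intro j hj
  simp only [List.mem_range] at hj
  by_cases hij : i = j
  · simp [hij]
  · simp only [if_neg hij]
    rw [pv_dist_eq d pontos i hi, pv_dist_eq d pontos j hj]
    rfl
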